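-- pv_equiv track=rewrite | github.com/jki14/competitive-programming | 2019/codeforces.com/goodbye-2019/proc.py | solution
-- ===== SOURCE A (Python) =====
-- def solution(a, n):
--     s = sum(a)
--     p = 1
--     while p <= s:
--         p <<= 1
--     p <<= 1
--     if (s & 1) == 1:
--         p |= 1
--     xor = p
--     for d in a:
--         xor ^= d
--     xor <<= 1
--     x = (xor - s - p) >> 1
--     return (p, x, x)
-- ===== SOURCE B (Python) =====
-- def solution(a, n):
--     # pairwise tree reduction computing (sum, xor) together, then a halving
--     # count for the power of two and plain arithmetic instead of bit ops
--     items = [(d, d) for d in a] if a else [(0, 0)]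
--     while len(items) > 1:
--         merged = []
--         for i in range(0, len(items) - 1, 2):
--             merged.append((items[i][0] + items[i + 1][0],
--                            items[i][1] ^ items[i + 1][1]))
--         if len(items) % 2 == 1:
--             merged.append(items[-1])
--         items = merged
--     s, t = items[0]
--     e, r = 1, s
--     while r > 0:
--         e += 1
--         r //= 2
--     p = 2 ** e + s % 2
--     w = 2 * (p ^ t) - s - p
--     return (p, w // 2, w // 2)
-- ===== Notes on version B (the rewrite author's own statement) =====
-- stated objective: alternative
-- what changed: B aggregates (sum, xor) in one pairwise tree reduction over the list instead of A's two separate linear passes, finds the power of two by counting halvings of s instead of A's doubling search on p, and uses plain arithmetic (2**e + s%2, //2) instead of A's shift/or/shift bit juggling.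
import Mathlib
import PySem

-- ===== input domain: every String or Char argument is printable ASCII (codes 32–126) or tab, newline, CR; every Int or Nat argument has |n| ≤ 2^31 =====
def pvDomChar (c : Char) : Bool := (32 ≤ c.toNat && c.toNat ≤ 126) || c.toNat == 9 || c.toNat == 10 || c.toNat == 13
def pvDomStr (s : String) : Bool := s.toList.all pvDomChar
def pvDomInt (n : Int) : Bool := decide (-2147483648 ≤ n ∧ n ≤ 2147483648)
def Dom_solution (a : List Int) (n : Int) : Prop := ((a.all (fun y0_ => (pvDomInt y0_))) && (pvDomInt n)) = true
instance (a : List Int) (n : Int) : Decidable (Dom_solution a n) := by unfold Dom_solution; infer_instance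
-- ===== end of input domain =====

-- B aggregates (sum, xor) by one pairwise tree reduction instead of two linear passes,
-- counts halvings of s instead of doubling p, and uses plain arithmetic instead of bit
-- juggling (objective: alternative; same cost as A).

-- ===== PORT A =====
-- `while p <= s: p <<= 1`; the loop is only ever entered with p = 1 and doubles p,
-- so the outer `1 ≤ p` test is a pure totality guard (always true on every call)
def solLoopA (s p : Int) : Int :=
  if 1 ≤ p then
    (if p ≤ s then solLoopA s (p <<< (1:Nat)) else p)
  else p
termination_by (s + 1 - p).toNat
decreasing_by simp_all [Int.shiftLeft_eq]; omega

def solution (a : List Int) (n : Int) : Int × Int × Int :=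
  let s := a.sum
  let p0 := solLoopA s 1
  let p1 := p0 <<< (1:Nat)
  let p := if PySem.Int.band s 1 == 1 then PySem.Int.bor p1 1 else p1
  let xor := a.foldl (fun x d => PySem.Int.bxor x d) p
  let xor1 := xor <<< (1:Nat)
  let x := (xor1 - s - p) >>> (1:Nat)
  (p, x, x)

-- ===== PORT B =====
-- one round of the merge loop body: `for i in range(0, len(items)-1, 2): append
-- (sum, xor) of the pair` plus the odd leftover — transcribed as a two-at-a-time
-- structural recursion over the same list (exact: same elements, same order)
def pairUp : List (Int × Int) → List (Int × Int)
  | x :: y :: rest => (x.1 + y.1, PySem.Int.bxor x.2 y.2) :: pairUp rest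
  | l => l

theorem pairUp_length (ps : List (Int × Int)) :
    (pairUp ps).length = (ps.length + 1) / 2 := by
  induction ps using pairUp.induct with
  | case1 x y rest ih => simp [pairUp, ih]; omega
  | case2 l h => cases l with
      | nil => simp [pairUp]
      | cons x l' =>
          cases l' with
          | nil => simp [pairUp]
          | cons y r => exact absurd rfl (h x y r)

-- `while len(items) > 1: items = merged`
def reduceLoop (ps : List (Int × Int)) : List (Int × Int) :=
  if 1 < ps.length then reduceLoop (pairUp ps) else ps
termination_by ps.length
decreasing_by rw [pairUp_length]; omega

-- `while r > 0: e += 1; r //= 2`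
def eLoop (e r : Int) : Int :=
  if 0 < r then eLoop (e + 1) (PySem.Int.floordiv r 2) else e
termination_by r.toNat
decreasing_by rw [PySem.Int.floordiv_eq_ediv_of_pos (by norm_num)]; omega

def solution_alt (a : List Int) (n : Int) : Int × Int × Int :=
  let items := if a = [] then [((0:Int), (0:Int))] else a.map (fun d => (d, d))
  let st := (reduceLoop items).headD (0, 0)   -- items[0]; items is provably nonempty
  let s := st.1
  let t := st.2
  let e := eLoop 1 s
  let p := (2:Int) ^ e.toNat + PySem.Int.mod s 2   -- 2 ** e; e ≥ 1 always, so toNat is exact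
  let w := 2 * PySem.Int.bxor p t - s - p
  (p, PySem.Int.floordiv w 2, PySem.Int.floordiv w 2)

-- ===== PRECONDITION & SPEC =====
def Spec_solution (a : List Int) (n : Int) (out : Int × Int × Int) : Prop := out = solution_alt a n
instance (a : List Int) (n : Int) (out : Int × Int × Int) : Decidable (Spec_solution a n out) := by unfold Spec_solution; infer_instance

-- ===== CLAIM (what is proved, stated in full; the proofs are below) =====
def Claim_equal_solution : Prop := ∀ (a : List Int) (n : Int), Dom_solution a n → Spec_solution a n (solution a n)

-- ===== LEMMAS AND PROOFS =====

theorem pv_bxor_eq_xor (a b : Int) : PySem.Int.bxor a b = Int.xor a b := by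
  unfold PySem.Int.bxor Int.xor
  rcases a with m | m <;> rcases b with n | n <;> simp [Int.negSucc_eq] <;> omega

theorem pv_xor_assoc (a b c : Int) :
    PySem.Int.bxor (PySem.Int.bxor a b) c = PySem.Int.bxor a (PySem.Int.bxor b c) := by
  simp only [pv_bxor_eq_xor]
  rcases a with m | m <;> rcases b with n | n <;> rcases c with k | k <;>
    simp [Int.xor, Nat.xor_assoc]

theorem pv_foldl_eq_foldr_bxor (l : List Int) (x : Int) :
    l.foldl (fun u d => PySem.Int.bxor u d) x
      = PySem.Int.bxor x (l.foldr (fun d u => PySem.Int.bxor d u) 0) := by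
  induction l generalizing x with
  | nil => simp [PySem.Int.bxor_zero]
  | cons d l ih =>
      simp only [List.foldl_cons, List.foldr_cons]
      rw [ih (PySem.Int.bxor x d), pv_xor_assoc]

def pvSumFst (ps : List (Int × Int)) : Int := (ps.map Prod.fst).sum
def pvXorSnd (ps : List (Int × Int)) : Int :=
  ps.foldr (fun q u => PySem.Int.bxor q.2 u) 0

theorem pairUp_sum (ps : List (Int × Int)) : pvSumFst (pairUp ps) = pvSumFst ps := by
  induction ps using pairUp.induct with
  | case1 x y rest ih => simp [pairUp, pvSumFst] at ih ⊢; omega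
  | case2 l h => cases l with
      | nil => rfl
      | cons x l' =>
          cases l' with
          | nil => rfl
          | cons y r => exact absurd rfl (h x y r)

theorem pairUp_xor (ps : List (Int × Int)) : pvXorSnd (pairUp ps) = pvXorSnd ps := by
  induction ps using pairUp.induct with
  | case1 x y rest ih =>
      simp only [pairUp, pvXorSnd, List.foldr_cons] at ih ⊢
      rw [pv_xor_assoc, ih]
  | case2 l h => cases l with
      | nil => rfl
      | cons x l' =>
          cases l' with
          | nil => rfl
          | cons y r => exact absurd rfl (h x y r)

theorem reduceLoop_props (ps : List (Int × Int)) :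
    pvSumFst (reduceLoop ps) = pvSumFst ps ∧ pvXorSnd (reduceLoop ps) = pvXorSnd ps ∧
    (reduceLoop ps).length ≤ 1 ∧ (ps ≠ [] → reduceLoop ps ≠ []) := by
  induction ps using reduceLoop.induct with
  | case1 ps h ih =>
      rw [reduceLoop, if_pos h]
      refine ⟨by rw [ih.1, pairUp_sum], by rw [ih.2.1, pairUp_xor], ih.2.2.1, ?_⟩
      intro _
      apply ih.2.2.2
      intro hc
      have := pairUp_length ps
      rw [hc] at this
      simp at this
      omega
  | case2 ps h =>
      rw [reduceLoop, if_neg h]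
      exact ⟨rfl, rfl, by omega, fun h _ => h (by assumption)⟩

-- the reduction of a nonempty list is the singleton holding (sum, xor)
theorem reduceLoop_head (ps : List (Int × Int)) (hne : ps ≠ []) :
    (reduceLoop ps).headD (0, 0) = (pvSumFst ps, pvXorSnd ps) := by
  obtain ⟨hs, hx, hlen, hne'⟩ := reduceLoop_props ps
  cases hq : reduceLoop ps with
  | nil => exact absurd hq (hne' hne)
  | cons q rest =>
      rw [hq] at hlen hs hx
      cases rest with
      | nil =>
          simp only [List.headD_cons]
          rw [← hs, ← hx]
          simp [pvSumFst, pvXorSnd]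
      | cons q2 r2 => simp at hlen
  
theorem pv_shl_one (z : Int) : z <<< (1:Nat) = 2 * z := by
  rw [Int.shiftLeft_eq]; ring

theorem pv_shr_one (z : Int) : z >>> (1:Nat) = z / 2 := by
  rw [Int.shiftRight_eq_div_pow]; norm_num

-- A's while-loop computes 2 ^ bit_length(s) for positive s
theorem pv_loop_pow (s : Int) (hs : 0 < s) :
    ∀ (d j : Nat), j + d = PySem.Int.bitLength s →
      solLoopA s ((2:Int) ^ j) = (2:Int) ^ PySem.Int.bitLength s := by
  intro d
  induction d with
  | zero =>
      intro j hj
      rw [solLoopA]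
      have hlt : s.natAbs < 2 ^ PySem.Int.bitLength s := PySem.Int.lt_two_pow_bitLength s
      have hslt : s < (2:Int) ^ PySem.Int.bitLength s := by
        have h2 : ((s.natAbs : Int)) < ((2 ^ PySem.Int.bitLength s : Nat) : Int) := by
          exact_mod_cast hlt
        push_cast at h2
        exact lt_of_le_of_lt (le_abs_self s) h2
      have hj0 : j = PySem.Int.bitLength s := by omega
      subst hj0
      simp [not_le.mpr hslt, one_le_pow₀ (one_le_two (α := Int))]
  | succ d ih =>
      intro j hj
      have hle : (2:Int) ^ j ≤ s := by
        have hge : 2 ^ (PySem.Int.bitLength s - 1) ≤ s.natAbs :=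
          PySem.Int.two_pow_bitLength_le s (by omega)
        have h2 : (2:ℕ) ^ j ≤ 2 ^ (PySem.Int.bitLength s - 1) :=
          Nat.pow_le_pow_right (by norm_num) (by omega)
        have h3 : ((2 ^ j : Nat) : Int) ≤ (s.natAbs : Int) := by
          exact_mod_cast le_trans h2 hge
        push_cast at h3
        rw [abs_of_pos hs] at h3
        exact h3
      rw [solLoopA]
      have hshift : ((2:Int) ^ j) <<< (1:Nat) = (2:Int) ^ (j + 1) := by
        rw [pv_shl_one]; ring
      rw [if_pos (one_le_pow₀ (one_le_two (α := Int))), if_pos hle, hshift]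
      exact ih (j + 1) (by omega)

theorem pv_loop_one (s : Int) (hs : s ≤ 0) : solLoopA s 1 = 1 := by
  rw [solLoopA]; simp [show ¬ (1:Int) ≤ s by omega]

-- B's halving loop counts bit_length for positive s
theorem pv_eLoop_pos_aux (m : Nat) :
    ∀ (s : Int), 0 < s → s.toNat ≤ m → ∀ e : Int,
      eLoop e s = e + (PySem.Int.bitLength s : Int) := by
  induction m with
  | zero => intro s hs hm; omega
  | succ m ih =>
      intro s hs hm e
      rw [eLoop, if_pos hs]
      have hfd : PySem.Int.floordiv s 2 = s / 2 :=
        PySem.Int.floordiv_eq_ediv_of_pos (by norm_num)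
      have hbl : PySem.Int.bitLength s = PySem.Int.bitLength (PySem.Int.floordiv s 2) + 1 :=
        PySem.Int.bitLength_of_pos hs
      by_cases hh : 0 < PySem.Int.floordiv s 2
      · rw [ih (PySem.Int.floordiv s 2) hh (by rw [hfd] at hh ⊢; omega) (e + 1), hbl]
        push_cast; ring
      · rw [eLoop, if_neg hh]
        have h0 : PySem.Int.floordiv s 2 = 0 := by rw [hfd] at hh ⊢; omega
        rw [h0, PySem.Int.bitLength_zero] at hbl
        rw [hbl]; push_cast; ring

theorem pv_eLoop_pos (s : Int) (hs : 0 < s) (e : Int) :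
    eLoop e s = e + (PySem.Int.bitLength s : Int) :=
  pv_eLoop_pos_aux s.toNat s hs le_rfl e

theorem pv_eLoop_nonpos (s : Int) (hs : s ≤ 0) (e : Int) : eLoop e s = e := by
  rw [eLoop, if_neg (by omega)]

theorem pv_or_one (m : Nat) : 2 * m ||| 1 = 2 * m + 1 := by
  apply Nat.eq_of_testBit_eq
  intro i
  rcases i with _ | i
  · simp [Nat.testBit_zero]
  · rw [Nat.testBit_or]
    simp [Nat.testBit_succ, show (1 : Nat) / 2 = 0 from rfl, show (2 * m + 1) / 2 = m by omega]

theorem pv_bor_even_one (r : Int) (hr : 0 ≤ r) : PySem.Int.bor (2 * r) 1 = 2 * r + 1 := by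
  rw [PySem.Int.bor_of_nonneg (by omega) (by norm_num)]
  rw [show (2 * r).toNat = 2 * r.toNat by omega, show (1 : Int).toNat = 1 from rfl, pv_or_one]
  omega

-- B's (s, t) accumulator equals A's sum and bare xor-fold
theorem pv_alt_st (a : List Int) :
    ((reduceLoop (if a = [] then [((0:Int), (0:Int))] else a.map (fun d => (d, d)))).headD (0, 0))
      = (a.sum, a.foldr (fun d u => PySem.Int.bxor d u) 0) := by
  by_cases ha : a = []
  · subst ha
    rw [if_pos rfl, reduceLoop_head _ (by simp)]
    simp [pvSumFst, pvXorSnd]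
  · rw [if_neg ha, reduceLoop_head _ (by simpa using ha)]
    congr 1
    · simp [pvSumFst, List.map_map, Function.comp_def]
    · unfold pvXorSnd
      rw [List.foldr_map]

theorem solution_eq (a : List Int) (n : Int) : solution a n = solution_alt a n := by
  unfold solution solution_alt
  dsimp only
  rw [pv_alt_st]
  dsimp only
  set s := a.sum with hsdef
  set t := a.foldr (fun d u => PySem.Int.bxor d u) 0 with htdef
  set b : Nat := if 0 < s then PySem.Int.bitLength s else 0 with hbdef
  -- both power computations give 2 ^ (b + 1)
  have hloop : solLoopA s 1 = (2:Int) ^ b := by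
    by_cases hpos : 0 < s
    · have h := pv_loop_pow s hpos (PySem.Int.bitLength s) 0 (by omega)
      norm_num at h
      rw [hbdef, if_pos hpos]; exact h
    · rw [pv_loop_one s (by omega), hbdef, if_neg hpos]; norm_num
  have heloop : (eLoop 1 s).toNat = b + 1 := by
    by_cases hpos : 0 < s
    · rw [pv_eLoop_pos s hpos 1, hbdef, if_pos hpos]; omega
    · rw [pv_eLoop_nonpos s (by omega) 1, hbdef, if_neg hpos]; decide
  rw [hloop, heloop]
  have hsh1 : ((2:Int) ^ b) <<< (1:Nat) = (2:Int) ^ (b + 1) := by rw [pv_shl_one]; ring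
  have hm : PySem.Int.mod s 2 = s % 2 := PySem.Int.mod_eq_emod_of_pos (by norm_num)
  have hp : (if PySem.Int.band s 1 == 1 then PySem.Int.bor ((2:Int) ^ (b + 1)) 1
              else (2:Int) ^ (b + 1)) = (2:Int) ^ (b + 1) + PySem.Int.mod s 2 := by
    rw [PySem.Int.band_one, hm]
    have hm01 : s % 2 = 0 ∨ s % 2 = 1 := by omega
    rcases hm01 with h | h
    · simp [h]
    · rw [h]
      simp only [beq_iff_eq]
      rw [show (2:Int) ^ (b + 1) = 2 * 2 ^ b by ring, pv_bor_even_one _ (by positivity)]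
      simp
  rw [hsh1, hp]
  set P := (2:Int) ^ (b + 1) + PySem.Int.mod s 2 with hPdef
  have hx : a.foldl (fun x d => PySem.Int.bxor x d) P = PySem.Int.bxor P t := by
    rw [pv_foldl_eq_foldr_bxor]
  rw [hx]
  set y := PySem.Int.bxor P t with hydef
  have harith : (y <<< (1:Nat) - s - P) >>> (1:Nat)
      = PySem.Int.floordiv (2 * y - s - P) 2 := by
    rw [pv_shl_one, pv_shr_one, PySem.Int.floordiv_eq_ediv_of_pos (by norm_num)]
  rw [harith]

-- ===== VERDICT (by name: the statement is the Claim_ definition above) =====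
theorem solution_spec : Claim_equal_solution := by
  intro a n _
  unfold Spec_solution
  exact solution_eq a n
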